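-- pv_equiv track=rewrite | github.com/vipulSP2108/ES113-Data-Centric-Computing | L21-Tweak-Quicksort-VIPulSP21/main.py | TwickQuick
-- ===== SOURCE A (Python) =====
-- def TwickQuick(listx,find):
--   if not listx:
--     return None
--   pivot=listx[0]
--   left=[]
--   right=[]
--   for x in listx:
--     if x<pivot:
--       left.append(x)
--     if x>pivot:
--       right.append(x)
--   i=len(left)
--   if find-1==i:
--     return pivot
--   elif find-1<i:
--     return TwickQuick(left,find)
--   else:
--     return TwickQuick(right,find-i-1)
-- ===== SOURCE B (Python) =====
-- def TwickQuick(listx, find):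
--     # Track the current candidate range as open value bounds over the ORIGINAL
--     # list instead of materializing sub-lists at each step.
--     lo = None  # exclusive lower bound on candidate values
--     hi = None  # exclusive upper bound on candidate values
--     while True:
--         pivot = None
--         for x in listx:
--             if (lo is None or lo < x) and (hi is None or x < hi):
--                 pivot = x
--                 break
--         if pivot is None:
--             return None
--         i = sum(1 for x in listx if (lo is None or lo < x) and x < pivot)
--         if find - 1 == i:
--             return pivot
--         elif find - 1 < i:
--             hi = pivot
--         else:
--             lo = pivot
--             find = find - i - 1
-- ===== Notes on version B (the rewrite author's own statement) =====
-- stated objective: alternative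
-- what changed: Replaces A's recursion that materializes new left/right sub-lists at every level by a single iterative loop over the original list that threads open value bounds (lo, hi) and the adjusted rank, never building sub-lists.
import Mathlib
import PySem

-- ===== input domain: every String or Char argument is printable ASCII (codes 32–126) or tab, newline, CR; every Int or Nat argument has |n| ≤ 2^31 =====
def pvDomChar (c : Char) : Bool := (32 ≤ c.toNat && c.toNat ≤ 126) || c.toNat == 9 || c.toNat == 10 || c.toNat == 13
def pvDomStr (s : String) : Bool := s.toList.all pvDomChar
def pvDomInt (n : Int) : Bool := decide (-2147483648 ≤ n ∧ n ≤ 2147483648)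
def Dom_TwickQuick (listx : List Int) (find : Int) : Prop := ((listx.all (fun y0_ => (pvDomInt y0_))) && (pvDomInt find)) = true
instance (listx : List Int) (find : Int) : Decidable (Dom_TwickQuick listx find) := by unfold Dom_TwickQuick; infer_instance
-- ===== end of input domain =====

-- B replaces A's recursive construction of left/right sub-lists by one iterative loop
-- threading open value bounds (lo, hi) over the original list (alternative decomposition).

-- ===== PORT A =====
-- needed by the port's decreasing_by: A's partition loop builds the two filters
theorem pvPartition_foldl (p : Int) :
    ∀ (l : List Int) (acc : List Int × List Int),
      l.foldl (fun lr x => (if _h : x < p then lr.1 ++ [x] else lr.1,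
                            if _h : x > p then lr.2 ++ [x] else lr.2)) acc
      = (acc.1 ++ l.filter (fun x => decide (x < p)),
         acc.2 ++ l.filter (fun x => decide (p < x))) := by
  intro l
  induction l with
  | nil => intro acc; simp
  | cons x xs ih =>
    intro acc
    simp only [List.foldl_cons, List.filter_cons, ih]
    rcases lt_trichotomy x p with h | h | h
    · have h2 : ¬ (x > p) := by omega
      simp [h, h2]
    · simp [h]
    · have h2 : ¬ (x < p) := by omega
      simp [h, h2]

def TwickQuick (listx : List Int) (find : Int) : Option Int :=
  match listx with
  | [] => none
  | p :: rest =>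
    let lr := (p :: rest).foldl
      (fun lr x => (if _h : x < p then lr.1 ++ [x] else lr.1,
                    if _h : x > p then lr.2 ++ [x] else lr.2)) ([], [])
    let i : Int := lr.1.length
    if find - 1 = i then some p
    else if find - 1 < i then TwickQuick lr.1 find
    else TwickQuick lr.2 (find - i - 1)
termination_by listx.length
decreasing_by
  · simp only [pvPartition_foldl, List.nil_append, List.filter_cons, List.length_cons]
    have := List.length_filter_le (fun x => decide (x < p)) rest
    simp only [lt_irrefl, decide_false, Bool.false_eq_true, if_false]
    omega
  · simp only [pvPartition_foldl, List.nil_append, List.filter_cons, List.length_cons]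
    have := List.length_filter_le (fun x => decide (p < x)) rest
    simp only [lt_irrefl, decide_false, Bool.false_eq_true, if_false]
    omega

-- ===== PORT B =====
def pvLoOk (lo : Option Int) (x : Int) : Bool :=
  match lo with | none => true | some l => decide (l < x)
def pvHiOk (hi : Option Int) (x : Int) : Bool :=
  match hi with | none => true | some h => decide (x < h)
def pvInB (lo hi : Option Int) (x : Int) : Bool := pvLoOk lo x && pvHiOk hi x

-- bound-narrowing facts, used by pvAltLoop's termination and by the equivalence proof
theorem pvLeft_pred (lo hi : Option Int) (p : Int) (hp : pvInB lo hi p = true) (x : Int) :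
    (decide (x < p) && pvInB lo hi x) = pvInB lo (some p) x := by
  rw [Bool.eq_iff_iff]
  cases lo <;> cases hi <;>
    simp [pvInB, pvLoOk, pvHiOk] at hp ⊢ <;> omega

theorem pvRight_pred (lo hi : Option Int) (p : Int) (hp : pvInB lo hi p = true) (x : Int) :
    (decide (p < x) && pvInB lo hi x) = pvInB (some p) hi x := by
  rw [Bool.eq_iff_iff]
  cases lo <;> cases hi <;>
    simp [pvInB, pvLoOk, pvHiOk] at hp ⊢ <;> omega

-- needed by pvAltLoop's decreasing_by: narrowing a bound past an element shrinks the filter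
theorem pvFilter_lt {l : List Int} {q r : Int → Bool}
    (h : ∀ x, q x = true → r x = true) {p : Int}
    (hp : p ∈ l) (hr : r p = true) (hq : q p = false) :
    (l.filter q).length < (l.filter r).length := by
  have heq : (l.filter r).filter q = l.filter q := by
    rw [List.filter_filter]
    apply List.filter_congr
    intro x _
    cases hqx : q x
    · simp
    · simp [h x hqx]
  have hlt : ((l.filter r).filter q).length < (l.filter r).length := by
    apply List.length_filter_lt_length_iff_exists.mpr
    exact ⟨p, List.mem_filter.mpr ⟨hp, hr⟩, by simp [hq]⟩
  rwa [heq] at hlt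

def pvAltLoop (listx : List Int) (lo hi : Option Int) (find : Int) : Option Int :=
  match hp : listx.find? (fun x => pvInB lo hi x) with
  | none => none
  | some p =>
    let i : Int := (listx.countP (fun x => pvLoOk lo x && decide (x < p)) : Nat)
    if find - 1 = i then some p
    else if find - 1 < i then pvAltLoop listx lo (some p) find
    else pvAltLoop listx (some p) hi (find - i - 1)
termination_by (listx.filter (fun x => pvInB lo hi x)).length
decreasing_by
  · have hpin : pvInB lo hi p = true := List.find?_some hp
    apply pvFilter_lt (p := p) _ (List.mem_of_find?_eq_some hp) hpin
    · simp [pvInB, pvHiOk]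
    · intro x hx
      rw [← pvLeft_pred lo hi p hpin x] at hx
      simp only [Bool.and_eq_true] at hx
      exact hx.2
  · have hpin : pvInB lo hi p = true := List.find?_some hp
    apply pvFilter_lt (p := p) _ (List.mem_of_find?_eq_some hp) hpin
    · simp [pvInB, pvLoOk]
    · intro x hx
      rw [← pvRight_pred lo hi p hpin x] at hx
      simp only [Bool.and_eq_true] at hx
      exact hx.2

def TwickQuick_alt (listx : List Int) (find : Int) : Option Int :=
  pvAltLoop listx none none find

-- ===== PRECONDITION & SPEC =====
def Spec_TwickQuick (listx : List Int) (find : Int) (out : Option Int) : Prop := out = TwickQuick_alt listx find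
instance (listx : List Int) (find : Int) (out : Option Int) : Decidable (Spec_TwickQuick listx find out) := by unfold Spec_TwickQuick; infer_instance

-- ===== CLAIM (what is proved, stated in full; the proofs are below) =====
def Claim_equal_TwickQuick : Prop := ∀ (listx : List Int) (find : Int), Dom_TwickQuick listx find → Spec_TwickQuick listx find (TwickQuick listx find)

-- ===== LEMMAS AND PROOFS =====
theorem pvFind?_eq_head?_filter (q : Int → Bool) :
    ∀ (l : List Int), l.find? q = (l.filter q).head? := by
  intro l
  induction l with
  | nil => simp
  | cons x xs ih =>
    cases h : q x
    · rw [List.find?_cons_of_neg (by simp [h]), List.filter_cons_of_neg (by simp [h])]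
      exact ih
    · rw [List.find?_cons_of_pos h, List.filter_cons_of_pos h]
      rfl

theorem pvAltLoop_none (listx : List Int) (lo hi : Option Int) (find : Int)
    (h : listx.find? (fun x => pvInB lo hi x) = none) :
    pvAltLoop listx lo hi find = none := by
  rw [pvAltLoop]
  split
  · rfl
  · rename_i p hp
    rw [h] at hp
    cases hp

theorem pvAltLoop_some (listx : List Int) (lo hi : Option Int) (find : Int) (p : Int)
    (h : listx.find? (fun x => pvInB lo hi x) = some p) :
    pvAltLoop listx lo hi find =
      (if find - 1 = ((listx.countP (fun x => pvLoOk lo x && decide (x < p)) : Nat) : Int)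
       then some p
       else if find - 1 < ((listx.countP (fun x => pvLoOk lo x && decide (x < p)) : Nat) : Int)
       then pvAltLoop listx lo (some p) find
       else pvAltLoop listx (some p) hi
         (find - ((listx.countP (fun x => pvLoOk lo x && decide (x < p)) : Nat) : Int) - 1)) := by
  rw [pvAltLoop]
  split
  · rename_i hp
    rw [h] at hp
    cases hp
  · rename_i p' hp
    rw [h] at hp
    injection hp with hp
    subst hp
    rfl

theorem pvKey (listx : List Int) :
    ∀ (n : Nat) (lo hi : Option Int) (find : Int),
      (listx.filter (fun x => pvInB lo hi x)).length ≤ n →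
      TwickQuick (listx.filter (fun x => pvInB lo hi x)) find = pvAltLoop listx lo hi find := by
  intro n
  induction n with
  | zero =>
    intro lo hi find hn
    have hnil : listx.filter (fun x => pvInB lo hi x) = [] := by
      cases h : listx.filter (fun x => pvInB lo hi x)
      · rfl
      · rw [h] at hn; simp at hn
    have hfnone : listx.find? (fun x => pvInB lo hi x) = none := by
      rw [pvFind?_eq_head?_filter, hnil]; rfl
    rw [hnil, TwickQuick, pvAltLoop_none listx lo hi find hfnone]
  | succ n ih =>
    intro lo hi find hn
    cases hsub : listx.filter (fun x => pvInB lo hi x) with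
    | nil =>
      have hfnone : listx.find? (fun x => pvInB lo hi x) = none := by
        rw [pvFind?_eq_head?_filter, hsub]; rfl
      rw [TwickQuick, pvAltLoop_none listx lo hi find hfnone]
    | cons p rest =>
      have hfind : listx.find? (fun x => pvInB lo hi x) = some p := by
        rw [pvFind?_eq_head?_filter, hsub]; rfl
      have hpin : pvInB lo hi p = true := List.find?_some hfind
      -- the two partitions of the current sublist are the narrowed filters
      have hL : (p :: rest).filter (fun x => decide (x < p))
          = listx.filter (fun x => pvInB lo (some p) x) := by
        rw [← hsub, List.filter_filter]
        apply List.filter_congr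
        intro x _
        exact pvLeft_pred lo hi p hpin x
      have hR : (p :: rest).filter (fun x => decide (p < x))
          = listx.filter (fun x => pvInB (some p) hi x) := by
        rw [← hsub, List.filter_filter]
        apply List.filter_congr
        intro x _
        exact pvRight_pred lo hi p hpin x
      have hcount : listx.countP (fun x => pvLoOk lo x && decide (x < p))
          = (listx.filter (fun x => pvInB lo (some p) x)).length := by
        rw [List.countP_eq_length_filter]
        rfl
      have hrestlen : rest.length + 1 ≤ n + 1 := by
        have h0 := hn; rw [hsub] at h0; simpa using h0
      have hlenL : (listx.filter (fun x => pvInB lo (some p) x)).length ≤ n := by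
        rw [← hL, List.filter_cons_of_neg (by simp)]
        have h1 := List.length_filter_le (fun x => decide (x < p)) rest
        omega
      have hlenR : (listx.filter (fun x => pvInB (some p) hi x)).length ≤ n := by
        rw [← hR, List.filter_cons_of_neg (by simp)]
        have h1 := List.length_filter_le (fun x => decide (p < x)) rest
        omega
      rw [TwickQuick, pvAltLoop_some listx lo hi find p hfind]
      simp only [pvPartition_foldl, List.nil_append, hcount, hL, hR]
      split_ifs with h1 h2
      · rfl
      · exact ih lo (some p) find hlenL
      · exact ih (some p) hi
          (find - ↑(listx.filter (fun x => pvInB lo (some p) x)).length - 1) hlenR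

-- ===== VERDICT (by name: the statement is the Claim_ definition above) =====
theorem TwickQuick_spec : Claim_equal_TwickQuick := by
  intro listx find _
  show TwickQuick listx find = TwickQuick_alt listx find
  have hfull : listx.filter (fun x => pvInB none none x) = listx := by
    simp [pvInB, pvLoOk, pvHiOk]
  unfold TwickQuick_alt
  rw [← pvKey listx listx.length none none find (by rw [hfull]), hfull]
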